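-- pv_equiv track=rewrite | github.com/thusharsabu/algo_practice | Practice/find_most_appearing_character.py | fin_char
-- ===== SOURCE A (Python) =====
-- def fin_char(str_arr):
--   count = {}
--
--   for word in str_arr:
--     current_unique = {}
--     for char in word:
--       if char not in current_unique:
--         if char in count:
--           count[char] += 1
--         else:
--           count[char] = 1
--         current_unique[char] = 1
--   new_arr = []
--   len_arr = len(str_arr)
--
--   for key in count:
--     if count[key] == len_arr:
--       new_arr.append(key)
--
--   return new_arr
-- ===== SOURCE B (Python) =====
-- def fin_char(str_arr):
--   if not str_arr:
--     return []
--   common = set(str_arr[0])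
--   for word in str_arr[1:]:
--     common &= set(word)
--   result = []
--   seen = set()
--   for char in str_arr[0]:
--     if char in common and char not in seen:
--       result.append(char)
--       seen.add(char)
--   return result
-- ===== Notes on version B (the rewrite author's own statement) =====
-- stated objective: idiomatic
-- what changed: Replaces A's per-character word-count dictionary (count each char once per word, then keep keys whose count equals len(str_arr)) by a running set intersection over the words followed by one ordered scan of the first word.
import Mathlib
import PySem

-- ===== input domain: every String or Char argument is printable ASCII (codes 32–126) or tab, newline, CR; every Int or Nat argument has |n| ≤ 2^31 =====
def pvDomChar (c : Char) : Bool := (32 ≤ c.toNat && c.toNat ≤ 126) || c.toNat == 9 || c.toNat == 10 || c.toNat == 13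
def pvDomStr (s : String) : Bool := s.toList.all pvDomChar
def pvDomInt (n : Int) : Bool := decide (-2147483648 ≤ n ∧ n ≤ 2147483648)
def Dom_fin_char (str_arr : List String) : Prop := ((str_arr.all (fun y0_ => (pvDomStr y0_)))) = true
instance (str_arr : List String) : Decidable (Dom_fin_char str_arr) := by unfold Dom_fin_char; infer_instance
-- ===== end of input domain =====

-- B replaces A's per-character word-count dict by a running set intersection plus one
-- ordered scan of the first word (idiomatic; same asymptotic cost).

-- ===== PORT A =====
-- literal port of Source A: count each char once per word in an insertion-ordered dict,
-- then keep the keys whose count equals len(str_arr).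
def fin_char (str_arr : List String) : List String :=
  let count : PySem.Dict Char Int :=
    str_arr.foldl (fun count word =>
      (word.toList.foldl (fun (st : PySem.Dict Char Int × PySem.Dict Char Int) char =>
        if !(st.2.contains char) then
          (if st.1.contains char then st.1.insert char (st.1.getD char 0 + 1)
           else st.1.insert char 1,
           st.2.insert char 1)
        else st) (count, PySem.Dict.empty)).1) PySem.Dict.empty
  let len_arr : Int := str_arr.length
  -- 'count[key]' with key ranging over count's keys is ported as getD (the key is always present)
  count.keys.foldl (fun new_arr key =>
    if count.getD key 0 = len_arr then new_arr ++ [String.mk [key]] else new_arr) []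

-- ===== PORT B =====
-- literal port of Source B: intersect the char sets, then scan the first word in order.
def fin_char_alt (str_arr : List String) : List String :=
  match str_arr with
  | [] => []
  | w0 :: rest =>
    let common : PySem.Set Char :=
      rest.foldl (fun common word => PySem.Set.inter common (PySem.Set.ofList word.toList))
        (PySem.Set.ofList w0.toList)
    (w0.toList.foldl (fun (st : List String × PySem.Set Char) char =>
      if PySem.Set.contains common char && !(PySem.Set.contains st.2 char) then
        (st.1 ++ [String.mk [char]], PySem.Set.add st.2 char)
      else st) ([], PySem.Set.empty)).1

-- ===== PRECONDITION & SPEC =====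
def Spec_fin_char (str_arr : List String) (out : List String) : Prop := out = fin_char_alt str_arr
instance (str_arr : List String) (out : List String) : Decidable (Spec_fin_char str_arr out) := by unfold Spec_fin_char; infer_instance

-- ===== CLAIM (what is proved, stated in full; the proofs are below) =====
def Claim_equal_fin_char : Prop := ∀ (str_arr : List String), Dom_fin_char str_arr → Spec_fin_char str_arr (fin_char str_arr)

-- ===== LEMMAS AND PROOFS =====

-- the dict update A performs for one char not yet seen in the current word
def pvIncr (d : PySem.Dict Char Int) (c : Char) : PySem.Dict Char Int :=
  if d.contains c then d.insert c (d.getD c 0 + 1) else d.insert c 1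

theorem pvIncr_eq : pvIncr = fun d c => d.insert c (d.getD c 0 + 1) := by
  funext d c
  unfold pvIncr
  split_ifs with h
  · rfl
  · rw [PySem.Dict.getD_of_not_contains d 0 (by simpa using h)]
    norm_num

-- first-occurrence sieve: the chars of cs outside seen, first occurrences, in order
def pvSv (seen : List Char) : List Char → List Char
  | [] => []
  | c :: cs => if c ∈ seen then pvSv seen cs else c :: pvSv (seen ++ [c]) cs

theorem mem_pvSv (a : Char) : ∀ (cs seen : List Char), a ∈ pvSv seen cs ↔ a ∈ cs ∧ a ∉ seen := by
  intro cs
  induction cs with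
  | nil => intro seen; simp [pvSv]
  | cons c cs ih =>
    intro seen
    by_cases h : c ∈ seen
    · rw [pvSv, if_pos h, ih]
      simp only [List.mem_cons]
      constructor
      · rintro ⟨h1, h2⟩; exact ⟨Or.inr h1, h2⟩
      · rintro ⟨rfl | h1, h2⟩
        · exact absurd h h2
        · exact ⟨h1, h2⟩
    · rw [pvSv, if_neg h]
      simp only [List.mem_cons, ih, List.mem_append, List.not_mem_nil, or_false]
      constructor
      · rintro (rfl | ⟨h1, h2⟩)
        · exact ⟨Or.inl rfl, h⟩
        · exact ⟨Or.inr h1, fun hs => h2 (Or.inl hs)⟩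
      · rintro ⟨rfl | h1, h2⟩
        · exact Or.inl rfl
        · by_cases hac : a = c
          · exact Or.inl hac
          · exact Or.inr ⟨h1, fun hor => hor.elim h2 hac⟩

theorem nodup_pvSv : ∀ (cs seen : List Char), (pvSv seen cs).Nodup := by
  intro cs
  induction cs with
  | nil => intro seen; simp [pvSv]
  | cons c cs ih =>
    intro seen
    by_cases h : c ∈ seen
    · rw [pvSv, if_pos h]; exact ih seen
    · rw [pvSv, if_neg h]
      refine List.nodup_cons.mpr ⟨fun hmem => ?_, ih (seen ++ [c])⟩
      exact ((mem_pvSv c cs (seen ++ [c])).mp hmem).2 (by simp)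

-- A's inner loop (over one word, threading current_unique) is pvIncr folded over the sieve
theorem pv_inner_eq : ∀ (cs : List Char) (d cu : PySem.Dict Char Int),
    (cs.foldl (fun (st : PySem.Dict Char Int × PySem.Dict Char Int) char =>
      if !(st.2.contains char) then
        (if st.1.contains char then st.1.insert char (st.1.getD char 0 + 1)
         else st.1.insert char 1,
         st.2.insert char 1)
      else st) (d, cu)).1 = (pvSv cu.keys cs).foldl pvIncr d := by
  intro cs
  induction cs with
  | nil => intro d cu; simp [pvSv]
  | cons c cs ih =>
    intro d cu
    by_cases h : c ∈ cu.keys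
    · have hc : cu.contains c = true := (PySem.Dict.contains_iff_mem_keys cu c).mpr h
      rw [List.foldl_cons, pvSv, if_pos h]
      simp only [hc, Bool.not_true, Bool.false_eq_true, if_false]
      exact ih d cu
    · have hc : cu.contains c = false := by
        by_contra hc'
        exact h ((PySem.Dict.contains_iff_mem_keys cu c).mp (by simpa using hc'))
      rw [List.foldl_cons, pvSv, if_neg h]
      simp only [hc, Bool.not_false, if_true]
      have hk : (cu.insert c (1 : Int)).keys = cu.keys ++ [c] :=
        PySem.Dict.keys_insert_of_not_contains cu 1 hc
      rw [show (if d.contains c = true then d.insert c (d.getD c 0 + 1) else d.insert c 1) = pvIncr d c from rfl]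
      rw [ih (pvIncr d c) (cu.insert c 1), hk]
      rfl

-- A's whole counting phase, in canonical form
def pvCount (ws : List String) (d : PySem.Dict Char Int) : PySem.Dict Char Int :=
  ws.foldl (fun d w => (pvSv [] w.toList).foldl pvIncr d) d

theorem pv_outer_eq (ws : List String) (d : PySem.Dict Char Int) :
    ws.foldl (fun count word =>
      (word.toList.foldl (fun (st : PySem.Dict Char Int × PySem.Dict Char Int) char =>
        if !(st.2.contains char) then
          (if st.1.contains char then st.1.insert char (st.1.getD char 0 + 1)
           else st.1.insert char 1,
           st.2.insert char 1)
        else st) (count, PySem.Dict.empty)).1) d = pvCount ws d := by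
  unfold pvCount
  congr 1
  funext count word
  have := pv_inner_eq word.toList count PySem.Dict.empty
  rwa [PySem.Dict.keys_empty] at this

theorem pv_getD_count : ∀ (ws : List String) (d : PySem.Dict Char Int) (a : Char),
    (pvCount ws d).getD a 0 = d.getD a 0 + ((ws.countP (fun w => w.toList.contains a) : Nat) : Int) := by
  intro ws
  induction ws with
  | nil => intro d a; simp [pvCount]
  | cons w ws ih =>
    intro d a
    have h1 : pvCount (w :: ws) d = pvCount ws ((pvSv [] w.toList).foldl pvIncr d) := rfl
    rw [h1, ih]
    rw [pvIncr_eq, PySem.Dict.getD_foldl_insert_add_one]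
    have hcnt : ((List.count a (pvSv [] w.toList) : Nat) : Int) = if w.toList.contains a then 1 else 0 := by
      by_cases hm : a ∈ w.toList
      · rw [List.count_eq_one_of_mem (nodup_pvSv w.toList []) ((mem_pvSv a w.toList []).mpr ⟨hm, by simp⟩)]
        simp [hm]
      · rw [List.count_eq_zero_of_not_mem (fun hx => hm ((mem_pvSv a w.toList []).mp hx).1)]
        simp [hm]
    rw [hcnt, List.countP_cons]
    by_cases hm : w.toList.contains a = true <;> simp [hm] <;> push_cast <;> ring

theorem pv_keys_count : ∀ (ws : List String) (d : PySem.Dict Char Int),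
    (pvCount ws d).keys = PySem.Set.update d.keys (ws.flatMap (fun w => pvSv [] w.toList)) := by
  intro ws
  induction ws with
  | nil => intro d; simp [pvCount, PySem.Set.update_nil]
  | cons w ws ih =>
    intro d
    have h1 : pvCount (w :: ws) d = pvCount ws ((pvSv [] w.toList).foldl pvIncr d) := rfl
    rw [h1, ih]
    rw [pvIncr_eq, PySem.Dict.keys_foldl_insert]
    rw [List.flatMap_cons, PySem.Set.update_append]

-- A's output loop as filter-and-map
theorem pv_foldl_out (d : PySem.Dict Char Int) (n : Int) (ks : List Char) :
    ks.foldl (fun new_arr key => if d.getD key 0 = n then new_arr ++ [String.mk [key]] else new_arr) [] =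
    (ks.filter (fun key => decide (d.getD key 0 = n))).map (fun c => String.mk [c]) := by
  have h := PySem.List.foldl_append_if (fun key => decide (d.getD key 0 = n)) (fun c => String.mk [c]) ks []
  simpa using h

-- B's scan, in canonical form
def pvBsv (Q : Char → Bool) (seen : List Char) : List Char → List Char
  | [] => []
  | c :: cs => if Q c = true ∧ c ∉ seen then c :: pvBsv Q (seen ++ [c]) cs else pvBsv Q seen cs

theorem pv_b_fold (common : PySem.Set Char) : ∀ (cs : List Char) (res : List String) (seen : List Char),
    (cs.foldl (fun (st : List String × PySem.Set Char) char =>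
      if PySem.Set.contains common char && !(PySem.Set.contains st.2 char) then
        (st.1 ++ [String.mk [char]], PySem.Set.add st.2 char)
      else st) (res, seen)).1
    = res ++ (pvBsv (fun c => PySem.Set.contains common c) seen cs).map (fun c => String.mk [c]) := by
  intro cs
  induction cs with
  | nil => intro res seen; simp [pvBsv]
  | cons c cs ih =>
    intro res seen
    rw [List.foldl_cons]
    by_cases hs : c ∈ seen
    · have h2 : PySem.Set.contains seen c = true := (PySem.Set.contains_iff seen c).mpr hs
      simp only [h2, Bool.not_true, Bool.and_false, Bool.false_eq_true, if_false]
      rw [pvBsv, if_neg (fun hcon => hcon.2 hs)]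
      exact ih res seen
    · have h2 : PySem.Set.contains seen c = false :=
        Bool.eq_false_iff.mpr (fun h => hs ((PySem.Set.contains_iff seen c).mp h))
      by_cases hq : PySem.Set.contains common c = true
      · simp only [hq, h2, Bool.not_false, Bool.and_true, if_true]
        rw [pvBsv, if_pos ⟨hq, hs⟩, PySem.Set.add_of_not_mem hs, ih]
        simp
      · have hq' : PySem.Set.contains common c = false := Bool.eq_false_iff.mpr hq
        simp only [hq', Bool.false_and, Bool.false_eq_true, if_false]
        rw [pvBsv, if_neg (fun hcon => hq hcon.1)]
        exact ih res seen

theorem pv_bsv_eq_filter (Q : Char → Bool) : ∀ (cs s1 s2 : List Char),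
    (∀ c, Q c = true → (c ∈ s1 ↔ c ∈ s2)) →
    pvBsv Q s1 cs = (pvSv s2 cs).filter Q := by
  intro cs
  induction cs with
  | nil => intro s1 s2 _; simp [pvBsv, pvSv]
  | cons c cs ih =>
    intro s1 s2 hQ
    by_cases hq : Q c = true
    · by_cases hs : c ∈ s1
      · have hs2 : c ∈ s2 := (hQ c hq).mp hs
        rw [pvBsv, if_neg (fun hcon => hcon.2 hs), pvSv, if_pos hs2]
        exact ih s1 s2 hQ
      · have hs2 : c ∉ s2 := fun h => hs ((hQ c hq).mpr h)
        rw [pvBsv, if_pos ⟨hq, hs⟩, pvSv, if_neg hs2, List.filter_cons_of_pos hq]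
        congr 1
        refine ih (s1 ++ [c]) (s2 ++ [c]) fun c' hq' => ?_
        simp only [List.mem_append, List.mem_singleton]
        constructor
        · rintro (h | h)
          · exact Or.inl ((hQ c' hq').mp h)
          · exact Or.inr h
        · rintro (h | h)
          · exact Or.inl ((hQ c' hq').mpr h)
          · exact Or.inr h
    · rw [pvBsv, if_neg (fun hcon => hq hcon.1)]
      by_cases hs2 : c ∈ s2
      · rw [pvSv, if_pos hs2]; exact ih s1 s2 hQ
      · rw [pvSv, if_neg hs2, List.filter_cons_of_neg (by simpa using hq)]
        refine ih s1 (s2 ++ [c]) fun c' hq' => ?_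
        have hcc : c' ≠ c := fun h => hq (h ▸ hq')
        simp only [List.mem_append, List.mem_singleton]
        constructor
        · intro h; exact Or.inl ((hQ c' hq').mp h)
        · rintro (h | h)
          · exact (hQ c' hq').mpr h
          · exact absurd h hcc

-- membership in the running intersection
theorem pv_mem_common : ∀ (rest : List String) (s : PySem.Set Char) (c : Char),
    c ∈ rest.foldl (fun common word => PySem.Set.inter common (PySem.Set.ofList word.toList)) s ↔
      c ∈ s ∧ ∀ w ∈ rest, c ∈ w.toList := by
  intro rest
  induction rest with
  | nil => intro s c; simp
  | cons w ws ih =>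
    intro s c
    rw [List.foldl_cons, ih]
    rw [PySem.Set.mem_inter, PySem.Set.mem_ofList]
    simp only [List.mem_cons]
    constructor
    · rintro ⟨⟨h1, h2⟩, h3⟩
      exact ⟨h1, fun w' hw' => hw'.elim (fun e => e ▸ h2) (h3 w')⟩
    · rintro ⟨h1, h2⟩
      exact ⟨⟨h1, h2 w (Or.inl rfl)⟩, fun w' hw' => h2 w' (Or.inr hw')⟩

-- filtering a set update by a predicate that only holds inside the base set
theorem pv_filter_update (P : Char → Bool) (s : PySem.Set Char) (b : List Char)
    (hP : ∀ c, P c = true → c ∈ s) :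
    (PySem.Set.update s b).filter P = s.filter P := by
  rw [PySem.Set.update_eq_append_filter, List.filter_append]
  have hnil : ((PySem.Set.ofList b).filter (fun y => !s.contains y)).filter P = [] := by
    rw [List.filter_eq_nil_iff]
    intro c hc hPc
    have h1 := (List.mem_filter.mp hc).2
    have h2 : s.contains c = true := (PySem.Set.contains_iff s c).mpr (hP c hPc)
    rw [h2] at h1
    simp at h1
  rw [hnil, List.append_nil]

-- ===== VERDICT (by name: the statement is the Claim_ definition above) =====
theorem fin_char_spec : Claim_equal_fin_char := by
  intro str_arr _
  unfold Spec_fin_char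
  cases str_arr with
  | nil => rfl
  | cons w0 rest =>
    simp only [fin_char, fin_char_alt]
    rw [pv_outer_eq, pv_foldl_out, pv_b_fold, List.nil_append]
    rw [pv_bsv_eq_filter _ w0.toList PySem.Set.empty [] (fun _ _ => Iff.rfl)]
    -- both sides are maps of filters; reduce to equality of the filtered lists
    congr 1
    -- A's key list is the sieve of the first word followed by later-word material
    rw [pv_keys_count, PySem.Dict.keys_empty, List.flatMap_cons, PySem.Set.update_nil_left,
      PySem.Set.ofList_append, PySem.Set.ofList_eq_self_of_nodup _ (nodup_pvSv w0.toList [])]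
    -- the count-based predicate holds only for chars of the first word
    have key_iff : ∀ a : Char,
        ((pvCount (w0 :: rest) PySem.Dict.empty).getD a 0 = ((w0 :: rest).length : Int)) ↔
          (∀ w ∈ w0 :: rest, a ∈ w.toList) := by
      intro a
      rw [pv_getD_count, PySem.Dict.getD_empty]
      constructor
      · intro h
        have hcp : (w0 :: rest).countP (fun w => w.toList.contains a) = (w0 :: rest).length := by
          omega
        intro w hw
        have := List.countP_eq_length.mp hcp w hw
        simpa using this
      · intro h
        have hcp : (w0 :: rest).countP (fun w => w.toList.contains a) = (w0 :: rest).length :=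
          List.countP_eq_length.mpr (fun w hw => by simpa using h w hw)
        omega
    rw [pv_filter_update _ _ _ (fun c hc => by
      have hmem : c ∈ w0.toList := (key_iff c).mp (of_decide_eq_true hc) w0 (List.mem_cons_self)
      exact (mem_pvSv c w0.toList []).mpr ⟨hmem, by simp⟩)]
    -- finally the two predicates agree on chars of the first word
    refine List.filter_congr fun a ha => ?_
    have haw0 : a ∈ w0.toList := ((mem_pvSv a w0.toList []).mp ha).1
    apply Bool.eq_iff_iff.mpr
    rw [decide_eq_true_eq, key_iff a, PySem.Set.contains_iff, pv_mem_common,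
      PySem.Set.mem_ofList, List.forall_mem_cons]
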